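-- pv_equiv track=rewrite | github.com/chaw1/cotstudio | backend/app/utils/security_scanner.py | get_threat_summary
-- ===== SOURCE A (Python) =====
-- from typing import Dict, List, Optional, Tuple, BinaryIO
--
-- def get_threat_summary(scan_result: Dict[str, any]) -> str:
--     """
--     获取威胁摘要
--
--     Args:
--         scan_result: 扫描结果
--
--     Returns:
--         str: 威胁摘要
--     """
--     threats = scan_result.get('threats', [])
--     if not threats:
--         return "文件安全"
--
--     high_threats = [t for t in threats if t.get('severity') == 'HIGH']
--     medium_threats = [t for t in threats if t.get('severity') == 'MEDIUM']
--
--     summary_parts = []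
--     if high_threats:
--         summary_parts.append(f"{len(high_threats)}个高危威胁")
--     if medium_threats:
--         summary_parts.append(f"{len(medium_threats)}个中危威胁")
--
--     return "检测到: " + ", ".join(summary_parts)
-- ===== SOURCE B (Python) =====
-- _LABELS = (("HIGH", "个高危威胁"), ("MEDIUM", "个中危威胁"))
--
-- def get_threat_summary(scan_result):
--     """Frequency table + spec table instead of per-severity filter scans."""
--     threats = scan_result.get('threats', [])
--     if not threats:
--         return "文件安全"
--     sevs = [t.get('severity') for t in threats]
--     counts = {}
--     for s in sevs:
--         counts[s] = counts.get(s, 0) + 1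
--     return "检测到: " + ", ".join(
--         f"{counts[sev]}{label}" for sev, label in _LABELS if sev in counts)
-- ===== Notes on version B (the rewrite author's own statement) =====
-- stated objective: alternative
-- what changed: Replaces the two hardcoded per-severity filter scans and if-branches with a generic frequency dictionary over the extracted severity list, read through a (severity,label) spec table to emit the parts.
import Mathlib
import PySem

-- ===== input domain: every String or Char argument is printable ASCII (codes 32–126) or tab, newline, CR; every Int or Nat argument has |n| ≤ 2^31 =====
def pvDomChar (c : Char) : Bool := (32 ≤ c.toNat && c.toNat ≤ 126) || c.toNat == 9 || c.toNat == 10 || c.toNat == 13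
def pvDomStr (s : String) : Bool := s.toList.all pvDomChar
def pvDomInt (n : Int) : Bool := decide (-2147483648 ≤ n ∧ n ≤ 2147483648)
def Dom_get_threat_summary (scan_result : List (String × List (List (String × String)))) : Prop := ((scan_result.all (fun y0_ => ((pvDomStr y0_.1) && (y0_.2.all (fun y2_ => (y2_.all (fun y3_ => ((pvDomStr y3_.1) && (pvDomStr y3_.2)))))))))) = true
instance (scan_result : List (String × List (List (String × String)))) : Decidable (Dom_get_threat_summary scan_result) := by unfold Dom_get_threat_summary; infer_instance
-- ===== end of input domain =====

-- B replaces A's two hardcoded per-severity filter scans by a generic frequency dict over the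
-- extracted severity list, read through a (severity,label) spec table; same output.

-- ===== PORT A =====
-- literal port of A: two list-comprehension filters, then parts built in HIGH-then-MEDIUM order
def get_threat_summary (scan_result : List (String × List (List (String × String)))) : String :=
  let threats := (PySem.Dict.mk scan_result).getD "threats" []
  if threats = [] then "文件安全"
  else
    let high_threats := threats.filter (fun t => (PySem.Dict.mk t).get? "severity" == some "HIGH")
    let medium_threats := threats.filter (fun t => (PySem.Dict.mk t).get? "severity" == some "MEDIUM")
    let parts : List String := []
    let parts := if high_threats ≠ [] then parts ++ [PySem.Int.toStr (high_threats.length : Int) ++ "个高危威胁"] else parts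
    let parts := if medium_threats ≠ [] then parts ++ [PySem.Int.toStr (medium_threats.length : Int) ++ "个中危威胁"] else parts
    "检测到: " ++ PySem.Str.join ", " parts

-- ===== PORT B =====
-- the module-level spec table _LABELS of Source B
def pvLabels : List (String × String) := [("HIGH", "个高危威胁"), ("MEDIUM", "个中危威胁")]

-- literal port of Source B: extract severities, build the frequency dict with the counts.get(s,0)+1
-- loop, then a table-driven join ('sev in counts' = get? returns some, 'counts[sev]' = that value)
def get_threat_summary_alt (scan_result : List (String × List (List (String × String)))) : String :=
  let threats := (PySem.Dict.mk scan_result).getD "threats" []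
  if threats = [] then "文件安全"
  else
    let sevs := threats.map (fun t => (PySem.Dict.mk t).get? "severity")
    let counts := sevs.foldl (fun (d : PySem.Dict (Option String) Int) s => d.insert s (d.getD s 0 + 1)) PySem.Dict.empty
    "检测到: " ++ PySem.Str.join ", "
      (pvLabels.filterMap (fun p => (counts.get? (some p.1)).map (fun c => PySem.Int.toStr c ++ p.2)))

-- ===== PRECONDITION & SPEC =====
def Spec_get_threat_summary (scan_result : List (String × List (List (String × String)))) (out : String) : Prop := out = get_threat_summary_alt scan_result
instance (scan_result : List (String × List (List (String × String)))) (out : String) : Decidable (Spec_get_threat_summary scan_result out) := by unfold Spec_get_threat_summary; infer_instance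

-- ===== CLAIM (what is proved, stated in full; the proofs are below) =====
def Claim_equal_get_threat_summary : Prop := ∀ (scan_result : List (String × List (List (String × String)))), Dom_get_threat_summary scan_result → Spec_get_threat_summary scan_result (get_threat_summary scan_result)

-- ===== LEMMAS AND PROOFS =====

-- lookup in a Counter: none for an absent key, the multiplicity otherwise
theorem get?_counter {κ : Type} [BEq κ] [LawfulBEq κ] (xs : List κ) (k : κ) :
    (PySem.Dict.counter xs).get? k = if xs.count k = 0 then none else some (xs.count k : Int) := by
  by_cases h : k ∈ xs
  · have hc : xs.count k ≠ 0 := by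
      have := List.count_pos_iff.mpr h; omega
    have hco : (PySem.Dict.counter xs).contains k = true := by
      simp [PySem.Dict.contains_counter, h]
    rw [PySem.Dict.contains_eq_isSome_get?] at hco
    obtain ⟨v, hv⟩ := Option.isSome_iff_exists.mp hco
    have := PySem.Dict.getD_counter xs k
    rw [PySem.Dict.getD_eq_get?_getD, hv] at this
    simp at this
    simp [hv, this, hc]
  · have hc : xs.count k = 0 := by simp [List.count_eq_zero]; exact h
    have hco : (PySem.Dict.counter xs).contains k = false := by
      simp [PySem.Dict.contains_counter, h]
    rw [PySem.Dict.contains_eq_isSome_get?] at hco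
    simp at hco
    simp [hco, hc]

-- a filter is nonempty iff the corresponding countP is nonzero
theorem filter_ne_nil_iff_countP {α : Type} (p : α → Bool) (ts : List α) :
    (ts.filter p ≠ []) ↔ (ts.countP p ≠ 0) := by
  rw [ne_eq, ← List.length_eq_zero_iff, ← List.countP_eq_length_filter]

-- ===== VERDICT (by name: the statement is the Claim_ definition above) =====
theorem get_threat_summary_spec : Claim_equal_get_threat_summary := by
  intro sr _
  unfold Spec_get_threat_summary get_threat_summary get_threat_summary_alt
  set threats := (PySem.Dict.mk sr).getD "threats" [] with hts
  by_cases h : threats = []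
  · simp [h]
  · simp only [h, if_false]
    rw [PySem.Dict.foldl_insert_getD_add_one_eq_counter]
    have hcount : ∀ (v : String),
        (threats.map (fun t => (PySem.Dict.mk t).get? "severity")).count (some v)
          = threats.countP (fun t => (PySem.Dict.mk t).get? "severity" == some v) := by
      intro v
      simp [List.count, List.countP_map]; rfl
    simp only [pvLabels, List.filterMap, get?_counter, hcount]
    rw [if_congr (filter_ne_nil_iff_countP _ threats) rfl rfl,
        if_congr (filter_ne_nil_iff_countP _ threats) rfl rfl]
    simp only [List.countP_eq_length_filter]
    by_cases h1 : (threats.filter (fun t => (PySem.Dict.mk t).get? "severity" == some "HIGH")).length = 0 <;>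
      by_cases h2 : (threats.filter (fun t => (PySem.Dict.mk t).get? "severity" == some "MEDIUM")).length = 0 <;>
        simp [h1, h2]
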